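-- pv_equiv track=rewrite | github.com/rumana-aktar/leetcode_problems | OneSingeRestTrice.py | oneSingleRestTrice
-- ===== SOURCE A (Python) =====
-- def oneSingleRestTrice(nums):
--
--     # for handling negative numbers
--     count_negs = 0
--     for x in nums:
--         if x < 0:
--             count_negs += 1
--
--
--     tn, tnp1, tnp2 = 2**32-1, 0, 0
--
--     for x in nums:
--         ctn, ctnp1, ctnp2 = tn & x, tnp1 & x, tnp2 & x
--
--         # set and unset according to ctn
--         tn = tn & (~ctn)
--         tnp1 = tnp1 | ctn
--
--         # set and unset according to ctnp1
--         tnp1 = tnp1 & (~ctnp1)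
--         tnp2 = tnp2 | ctnp1
--
--         # set and unset according to ctn
--         tnp2 = tnp2 & (~ctnp2)
--         tn = tn | ctnp2
--
--     # if count_negs is multiple of negative, then target number is positive
--     # else, target number must bee negative
--     if count_negs % 3 == 0:
--         return tnp1
--     else:
--         return -tnp1
-- ===== SOURCE B (Python) =====
-- def oneSingleRestTrice(nums):
--
--     # for handling negative numbers (same counting loop as before)
--     count_negs = 0
--     for x in nums:
--         if x < 0:
--             count_negs += 1
--
--     # per-bit counting over the 32 low bit positions instead of a state machine:
--     # a bit is set in the answer iff it is set in a number of elements that is 1 mod 3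
--     result = 0
--     for i in range(32):
--         ones = 0
--         for x in nums:
--             if (x >> i) & 1:
--                 ones += 1
--         if ones % 3 == 1:
--             result += 1 << i
--
--     if count_negs % 3 == 0:
--         return result
--     else:
--         return -result
-- ===== Notes on version B (the rewrite author's own statement) =====
-- stated objective: alternative
-- what changed: Replaced the three-register bitwise state machine (tn/tnp1/tnp2 updated per element) by a double loop over the 32 low bit positions that counts set bits per position mod 3 and assembles the answer, keeping the negative-count sign logic.
import Mathlib
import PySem

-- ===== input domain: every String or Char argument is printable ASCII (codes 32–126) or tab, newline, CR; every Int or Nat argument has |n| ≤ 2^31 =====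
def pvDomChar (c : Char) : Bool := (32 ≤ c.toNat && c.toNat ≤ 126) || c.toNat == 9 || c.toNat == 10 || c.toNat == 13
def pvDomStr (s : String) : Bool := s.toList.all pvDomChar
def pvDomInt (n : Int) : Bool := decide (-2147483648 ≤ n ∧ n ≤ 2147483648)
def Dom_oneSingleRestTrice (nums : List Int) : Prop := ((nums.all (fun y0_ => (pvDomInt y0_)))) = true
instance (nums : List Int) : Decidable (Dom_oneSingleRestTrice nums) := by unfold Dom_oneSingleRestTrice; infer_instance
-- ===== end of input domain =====

-- B replaces A's three-register bitwise state machine by per-bit mod-3 counting over the 32 low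
-- bit positions (objective: alternative algorithm; same sign handling via the count of negatives).

-- ===== PORT A =====
-- loop body of A's state machine, step for step
def pvStepA (s : Int × Int × Int) (x : Int) : Int × Int × Int :=
  let ctn := PySem.Int.band s.1 x
  let ctnp1 := PySem.Int.band s.2.1 x
  let ctnp2 := PySem.Int.band s.2.2 x
  let tn := PySem.Int.band s.1 (Int.not ctn)
  let tnp1 := PySem.Int.bor s.2.1 ctn
  let tnp1 := PySem.Int.band tnp1 (Int.not ctnp1)
  let tnp2 := PySem.Int.bor s.2.2 ctnp1
  let tnp2 := PySem.Int.band tnp2 (Int.not ctnp2)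
  let tn := PySem.Int.bor tn ctnp2
  (tn, tnp1, tnp2)

def oneSingleRestTrice (nums : List Int) : Int :=
  let count_negs : Int := nums.foldl (fun c x => if x < 0 then c + 1 else c) 0
  let s := nums.foldl pvStepA ((2:Int)^32 - 1, 0, 0)
  if PySem.Int.mod count_negs 3 = 0 then s.2.1 else -s.2.1

-- ===== PORT B =====
-- B's inner loop: how many elements have '(x >> i) & 1' truthy
def pvOnes (nums : List Int) (k : Nat) : Int :=
  nums.foldl (fun (o : Int) (x : Int) => if PySem.Int.band (x >>> k) 1 ≠ 0 then o + 1 else o) 0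

def oneSingleRestTrice_alt (nums : List Int) : Int :=
  let count_negs : Int := nums.foldl (fun c x => if x < 0 then c + 1 else c) 0
  -- i runs over range(32), so i.toNat is exact for Python's 'x >> i' and '1 << i'
  let result : Int := (PySem.List.pyRange 0 32).foldl
    (fun r i => if PySem.Int.mod (pvOnes nums i.toNat) 3 = 1 then r + ((1:Int) <<< i.toNat) else r) 0
  if PySem.Int.mod count_negs 3 = 0 then result else -result

-- ===== PRECONDITION & SPEC =====
def Spec_oneSingleRestTrice (nums : List Int) (out : Int) : Prop := out = oneSingleRestTrice_alt nums
instance (nums : List Int) (out : Int) : Decidable (Spec_oneSingleRestTrice nums out) := by unfold Spec_oneSingleRestTrice; infer_instance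

-- ===== CLAIM (what is proved, stated in full; the proofs are below) =====
def Claim_equal_oneSingleRestTrice : Prop := ∀ (nums : List Int), Dom_oneSingleRestTrice nums → Spec_oneSingleRestTrice nums (oneSingleRestTrice nums)

-- ===== LEMMAS AND PROOFS =====

-- bridge: PySem's Python-exact band/bor equal Mathlib's Int.land/Int.lor
theorem pv_and_add_ldiff : ∀ (a b : ℕ), (a &&& b) + a.ldiff b = a := by
  intro a
  induction a using Nat.binaryRec with
  | zero => intro b; simp [Nat.ldiff]
  | bit x m ih =>
    intro b
    cases b using Nat.bitCasesOn with
    | bit y n =>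
      rw [Nat.land_bit, Nat.ldiff_bit]
      simp only [Nat.bit_val]
      have h := ih n
      cases x <;> cases y <;>
        simp only [Bool.and_true, Bool.and_false,
          Bool.not_true, Bool.not_false, Bool.toNat_true, Bool.toNat_false] <;> omega

theorem pv_band_eq_land (a b : Int) : PySem.Int.band a b = Int.land a b := by
  have h1 := pv_and_add_ldiff a.toNat (-b-1).toNat
  have h2 := pv_and_add_ldiff b.toNat (-a-1).toNat
  unfold PySem.Int.band Int.land
  rcases a with a|a <;> rcases b with b|b <;> simp_all [Int.negSucc_eq] <;> omega

theorem pv_bor_eq_lor (a b : Int) : PySem.Int.bor a b = Int.lor a b := by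
  have h1 := pv_and_add_ldiff (-b-1).toNat a.toNat
  have h2 := pv_and_add_ldiff (-a-1).toNat b.toNat
  unfold PySem.Int.bor Int.lor
  rcases a with a|a <;> rcases b with b|b <;> simp_all [Int.negSucc_eq] <;> omega

theorem pv_not_eq_lnot (a : Int) : Int.not a = Int.lnot a := rfl

-- per-bit count of the list
def pvCnt (nums : List Int) (t : Nat) : Nat := nums.countP (fun x => x.testBit t)

-- invariant of A's state machine: register r has bit t set iff t < 32 and the count so far is r mod 3
def pvInv (f : Nat → Nat) (s : Int × Int × Int) : Prop :=
  ∀ t, s.1.testBit t = (decide (t < 32) && decide (f t % 3 = 0))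
     ∧ s.2.1.testBit t = (decide (t < 32) && decide (f t % 3 = 1))
     ∧ s.2.2.testBit t = (decide (t < 32) && decide (f t % 3 = 2))

theorem pvInv_congr {f g : Nat → Nat} {s : Int × Int × Int}
    (hfg : ∀ t, f t = g t) (h : pvInv f s) : pvInv g s := by
  intro t
  rw [← hfg t]
  exact h t

theorem pvInv_step {f : Nat → Nat} {s : Int × Int × Int} (x : Int) (h : pvInv f s) :
    pvInv (fun t => f t + (if x.testBit t then 1 else 0)) (pvStepA s x) := by
  intro t
  obtain ⟨h1, h2, h3⟩ := h t
  simp only [pvStepA, pv_band_eq_land, pv_bor_eq_lor, pv_not_eq_lnot]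
  simp only [Int.testBit_land, Int.testBit_lor, Int.testBit_lnot, h1, h2, h3]
  by_cases ht : t < 32
  · have h3c : f t % 3 = 0 ∨ f t % 3 = 1 ∨ f t % 3 = 2 := by omega
    by_cases hx : x.testBit t = true <;> rcases h3c with hc | hc | hc <;>
      · have m0 : (f t + 1) % 3 = (f t % 3 + 1) % 3 := by omega
        simp [hx, ht, hc, m0]
  · simp [ht]

theorem pvInv_foldl (l : List Int) : ∀ (f : Nat → Nat) (s : Int × Int × Int), pvInv f s →
    pvInv (fun t => f t + pvCnt l t) (l.foldl pvStepA s) := by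
  induction l with
  | nil => intro f s h; simpa [pvCnt] using h
  | cons x xs ih =>
    intro f s h
    have h' := ih _ _ (pvInv_step x h)
    refine pvInv_congr (fun t => ?_) h'
    simp [pvCnt, List.countP_cons]
    omega

theorem pvInv_init : pvInv (fun _ => 0) ((2:Int)^32 - 1, 0, 0) := by
  intro t
  refine ⟨?_, ?_, ?_⟩
  · have he : ((2:Int)^32 - 1) = Int.ofNat (2^32 - 1) := by decide
    rw [he]
    show Nat.testBit (2^32 - 1) t = _
    rw [Nat.testBit_two_pow_sub_one]
    simp
  · show Nat.testBit 0 t = _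
    simp
  · show Nat.testBit 0 t = _
    simp

-- A's middle register after the whole loop, characterised bit by bit
theorem pvA_bits (nums : List Int) (t : Nat) :
    (nums.foldl pvStepA ((2:Int)^32 - 1, 0, 0)).2.1.testBit t
      = (decide (t < 32) && decide (pvCnt nums t % 3 = 1)) := by
  have := (pvInv_foldl nums _ _ pvInv_init) t
  simpa using this.2.1

-- B's condition '(x >> i) & 1' is exactly testBit
theorem pv_band_one (x : Int) (k : Nat) :
    PySem.Int.band (x >>> k) 1 = if x.testBit k then 1 else 0 := by
  rw [pv_band_eq_land]
  have hd : ∀ n : Nat, Nat.testBit n k = decide (n / 2^k % 2 = 1) :=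
    fun n => Nat.testBit_eq_decide_div_mod_eq
  rcases x with n | n
  · show Int.land (Int.ofNat (n >>> k)) (Int.ofNat 1) = _
    simp only [Int.land]
    by_cases hb : Nat.testBit n k = true
    · rw [if_pos (show (Int.ofNat n).testBit k = true from hb)]
      have h2 : n / 2^k % 2 = 1 := by
        have h := hd n; rw [hb] at h; simpa using h.symm
      rw [Nat.and_one_is_mod, Nat.shiftRight_eq_div_pow, h2]
      rfl
    · have hbf : Nat.testBit n k = false := by revert hb; cases Nat.testBit n k <;> simp
      rw [if_neg (show ¬ (Int.ofNat n).testBit k = true from by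
        rw [show (Int.ofNat n).testBit k = Nat.testBit n k from rfl, hbf]; simp)]
      have h2 : n / 2^k % 2 = 0 := by
        have h := hd n; rw [hbf] at h
        have h' : ¬ (n / 2^k % 2 = 1) := by simpa using h.symm
        omega
      rw [Nat.and_one_is_mod, Nat.shiftRight_eq_div_pow, h2]
      rfl
  · show Int.land (Int.negSucc (n >>> k)) (Int.ofNat 1) = _
    simp only [Int.land]
    have hld := pv_and_add_ldiff 1 (n >>> k)
    have h1m : (1:Nat) &&& (n >>> k) = (n >>> k) % 2 := by
      rw [Nat.land_comm, Nat.and_one_is_mod]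
    rw [h1m] at hld
    have hsh : n >>> k = n / 2^k := Nat.shiftRight_eq_div_pow n k
    by_cases hb : Nat.testBit n k = true
    · have h2 : n / 2^k % 2 = 1 := by
        have h := hd n; rw [hb] at h; simpa using h.symm
      have hneg : (Int.negSucc n).testBit k = false := by
        show (!Nat.testBit n k) = false
        rw [hb]; rfl
      rw [if_neg (by rw [hneg]; simp)]
      have h2' : (n >>> k) % 2 = 1 := by rw [hsh]; exact h2
      have hz : Nat.ldiff 1 (n >>> k) = 0 := by omega
      rw [hz]; rfl
    · have hbf : Nat.testBit n k = false := by revert hb; cases Nat.testBit n k <;> simp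
      have h2 : n / 2^k % 2 = 0 := by
        have h := hd n; rw [hbf] at h
        have h' : ¬ (n / 2^k % 2 = 1) := by simpa using h.symm
        omega
      have hneg : (Int.negSucc n).testBit k = true := by
        show (!Nat.testBit n k) = true
        rw [hbf]; rfl
      rw [if_pos hneg]
      have h2' : (n >>> k) % 2 = 0 := by rw [hsh]; exact h2
      have hz : Nat.ldiff 1 (n >>> k) = 1 := by omega
      rw [hz]; rfl

-- B's inner fold equals the per-bit count
theorem pvOnes_eq_cnt (nums : List Int) (k : Nat) : pvOnes nums k = (pvCnt nums k : Int) := by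
  unfold pvOnes
  have hfun : (fun (o : Int) (x : Int) => if PySem.Int.band (x >>> k) 1 ≠ 0 then o + 1 else o)
      = (fun (acc : Int) (x : Int) => if (fun (y : Int) => y.testBit k) x = true then acc + 1 else acc) := by
    funext o x
    rw [pv_band_one]
    cases h : x.testBit k <;> simp [h]
  rw [hfun, PySem.List.foldl_count_if]
  simp [pvCnt]

-- the canonical value whose bits are {t < n | pvCnt t % 3 = 1}
def pvVal (nums : List Int) : Nat → Nat
  | 0 => 0
  | n+1 => pvVal nums n + (if pvCnt nums n % 3 = 1 then 2^n else 0)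

theorem pvVal_lt (nums : List Int) : ∀ n, pvVal nums n < 2^n := by
  intro n
  induction n with
  | zero => simp [pvVal]
  | succ n ih =>
    simp only [pvVal, pow_succ]
    split <;> omega

theorem pvVal_testBit (nums : List Int) : ∀ n t,
    (pvVal nums n).testBit t = (decide (t < n) && decide (pvCnt nums t % 3 = 1)) := by
  intro n
  induction n with
  | zero => intro t; simp [pvVal]
  | succ n ih =>
    intro t
    simp only [pvVal]
    by_cases hc : pvCnt nums n % 3 = 1
    · rw [if_pos hc]
      have h := Nat.testBit_two_pow_mul_add 1 (i := n) (b := pvVal nums n) (pvVal_lt nums n) t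
      rw [Nat.mul_one] at h
      rw [Nat.add_comm, h]
      rcases Nat.lt_trichotomy t n with ht | rfl | ht
      · rw [if_pos ht, ih t]
        simp [ht, Nat.lt_succ_of_lt ht]
      · rw [if_neg (by omega)]
        simp [hc]
      · rw [if_neg (by omega)]
        have h1 : (1:Nat) = 2^0 := rfl
        rw [h1, Nat.testBit_two_pow]
        have : ¬ t < n + 1 := by omega
        simp [this]
        omega
    · rw [if_neg hc, Nat.add_zero, ih t]
      by_cases htn : t = n
      · subst htn; simp [hc]
      · rcases Nat.lt_or_ge t n with h | h
        · simp [h, Nat.lt_succ_of_lt h]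
        · have h2 : ¬ t < n := by omega
          have h3 : ¬ t < n + 1 := by omega
          simp [h2, h3]

-- an Int with all bits ≥ 32 clear is the cast of its toNat
theorem pv_ofNat_of_highbits (z : Int) (h : ∀ t, 32 ≤ t → z.testBit t = false) :
    z = Int.ofNat z.toNat := by
  rcases z with n | n
  · rfl
  · exfalso
    have hm : n.testBit (max 32 n) = false :=
      Nat.testBit_eq_false_of_lt
        (lt_of_lt_of_le Nat.lt_two_pow_self (Nat.pow_le_pow_right (by omega) (le_max_right _ _)))
    have hz := h (max 32 n) (le_max_left _ _)
    have hb : (Int.negSucc n).testBit (max 32 n) = !n.testBit (max 32 n) := rfl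
    rw [hb, hm] at hz
    simp at hz

-- B's outer fold computes pvVal 32
theorem pvB_result (nums : List Int) :
    (PySem.List.pyRange 0 32).foldl
      (fun r i => if PySem.Int.mod (pvOnes nums i.toNat) 3 = 1 then r + ((1:Int) <<< i.toNat) else r) 0
    = Int.ofNat (pvVal nums 32) := by
  have h32 : (32 : Int) = ((32 : Nat) : Int) := rfl
  rw [h32, PySem.List.pyRange_zero_natCast, List.foldl_map]
  simp only [Int.toNat_natCast]
  suffices H : ∀ n : Nat, (List.range n).foldl
      (fun (r : Int) (k : Nat) => if PySem.Int.mod (pvOnes nums k) 3 = 1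
        then r + ((1:Int) <<< k) else r) 0 = Int.ofNat (pvVal nums n) from H 32
  intro n
  induction n with
  | zero => simp [pvVal]
  | succ n ih =>
    rw [List.range_succ, List.foldl_append, ih]
    simp only [List.foldl_cons, List.foldl_nil]
    rw [pvOnes_eq_cnt]
    rw [show PySem.Int.mod ((pvCnt nums n : Nat) : Int) 3 = ((pvCnt nums n % 3 : Nat) : Int) from
      by exact_mod_cast PySem.Int.mod_natCast (pvCnt nums n) 3]
    by_cases hc : pvCnt nums n % 3 = 1
    · rw [if_pos (by exact_mod_cast hc)]
      have hs : (1:Int) <<< n = Int.ofNat (1 <<< n) := rfl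
      rw [hs]
      simp only [pvVal, hc, if_pos]
      rw [Nat.shiftLeft_eq, Nat.one_mul]
      rfl
    · rw [if_neg (by exact_mod_cast hc)]
      simp [pvVal, hc]

-- the two state computations agree
theorem pv_main (nums : List Int) :
    (nums.foldl pvStepA ((2:Int)^32 - 1, 0, 0)).2.1
      = (PySem.List.pyRange 0 32).foldl
          (fun r i => if PySem.Int.mod (pvOnes nums i.toNat) 3 = 1 then r + ((1:Int) <<< i.toNat) else r) 0 := by
  rw [pvB_result]
  have hhigh : ∀ t, 32 ≤ t → (nums.foldl pvStepA ((2:Int)^32 - 1, 0, 0)).2.1.testBit t = false := by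
    intro t ht
    rw [pvA_bits]
    simp [Nat.not_lt.mpr ht]
  have hE := pv_ofNat_of_highbits _ hhigh
  rw [hE]
  congr 1
  apply Nat.eq_of_testBit_eq
  intro t
  have hbit : ((Int.ofNat ((nums.foldl pvStepA ((2:Int)^32 - 1, 0, 0)).2.1.toNat)).testBit t)
      = ((nums.foldl pvStepA ((2:Int)^32 - 1, 0, 0)).2.1.toNat).testBit t := rfl
  rw [← hbit, ← hE, pvA_bits, pvVal_testBit]

-- ===== VERDICT (by name: the statement is the Claim_ definition above) =====
theorem oneSingleRestTrice_spec : Claim_equal_oneSingleRestTrice := by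
  intro nums _
  unfold Spec_oneSingleRestTrice oneSingleRestTrice oneSingleRestTrice_alt
  simp only []
  rw [pv_main]
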